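-- pv_equiv track=rewrite | github.com/Muminbek/Start-out-with-python | chapter_09/9_7_world_series_winners.py | WinningTeam
-- ===== SOURCE A (Python) =====
-- def WinningTeam(list):
--     dict = {}
--     year = 1903
--
--     for team in list:
--         if year != 1904 and year != 1994:
--             dict[year] = team
--         else:
--             year += 1
--             dict[year] = team
--         year +=1
--     return dict
-- ===== SOURCE B (Python) =====
-- def WinningTeam(list):
--     # closed form: the i-th winner's year is 1903 + i, plus 1 once 1904 has
--     # been skipped (i >= 1) and once more after 1994 is skipped (i >= 90)
--     return {1903 + i + (1 if i >= 1 else 0) + (1 if i >= 90 else 0): team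
--             for i, team in enumerate(list)}
-- ===== Notes on version B (the rewrite author's own statement) =====
-- stated objective: simpler
-- what changed: Replaces the stateful year counter with its double-increment skip branches by a one-line dict comprehension computing each year in closed form from the index.
import Mathlib
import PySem

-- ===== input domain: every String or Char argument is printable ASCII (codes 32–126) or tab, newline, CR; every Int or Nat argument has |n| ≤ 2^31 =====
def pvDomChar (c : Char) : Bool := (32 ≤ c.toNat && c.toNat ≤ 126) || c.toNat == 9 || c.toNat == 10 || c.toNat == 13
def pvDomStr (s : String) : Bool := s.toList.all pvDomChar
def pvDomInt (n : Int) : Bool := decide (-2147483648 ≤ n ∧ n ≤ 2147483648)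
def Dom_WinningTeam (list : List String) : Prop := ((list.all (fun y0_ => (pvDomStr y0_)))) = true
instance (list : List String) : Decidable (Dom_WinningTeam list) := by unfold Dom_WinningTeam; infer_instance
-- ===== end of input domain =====

-- B replaces A's stateful year counter (with double-increment skip branches) by a
-- closed-form year-from-index dict comprehension; objective: simpler.


-- ===== PORT A =====
-- loop body of A: state is (dict, year)
def wtStepA (st : PySem.Dict Int String × Int) (team : String) : PySem.Dict Int String × Int :=
  if st.2 ≠ 1904 ∧ st.2 ≠ 1994 then (st.1.insert st.2 team, st.2 + 1)
  else (st.1.insert (st.2 + 1) team, (st.2 + 1) + 1)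

def WinningTeam (list : List String) : List (Int × String) :=
  (list.foldl wtStepA (PySem.Dict.empty, 1903)).1.items

-- ===== PORT B =====
-- closed-form year for index i
def wtYearAt (i : Int) : Int :=
  1903 + i + (if 1 ≤ i then 1 else 0) + (if 90 ≤ i then 1 else 0)

def WinningTeam_alt (list : List String) : List (Int × String) :=
  ((PySem.List.enumerate list).foldl
      (fun (d : PySem.Dict Int String) p => d.insert (wtYearAt p.1) p.2)
      PySem.Dict.empty).items

-- ===== PRECONDITION & SPEC =====
def Spec_WinningTeam (list : List String) (out : List (Int × String)) : Prop := out = WinningTeam_alt list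
instance (list : List String) (out : List (Int × String)) : Decidable (Spec_WinningTeam list out) := by unfold Spec_WinningTeam; infer_instance

-- ===== CLAIM (what is proved, stated in full; the proofs are below) =====
def Claim_equal_WinningTeam : Prop := ∀ (list : List String), Dom_WinningTeam list → Spec_WinningTeam list (WinningTeam list)

-- ===== LEMMAS AND PROOFS =====

-- A's year variable before processing index s
def wtPre (s : Int) : Int :=
  1903 + s + (if 2 ≤ s then 1 else 0) + (if 91 ≤ s then 1 else 0)

lemma wt_fold_eq (l : List String) : ∀ (s : Int), 0 ≤ s → ∀ (d : PySem.Dict Int String),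
    (l.foldl wtStepA (d, wtPre s)).1
      = (PySem.List.enumerate l s).foldl
          (fun (d : PySem.Dict Int String) p => d.insert (wtYearAt p.1) p.2) d := by
  induction l with
  | nil => intro s _ d; simp [PySem.List.enumerate_nil]
  | cons t l ih =>
    intro s hs d
    rw [PySem.List.enumerate_cons]
    simp only [List.foldl_cons]
    by_cases h1 : s = 1
    · subst h1
      have hA : wtStepA (d, wtPre 1) t = (d.insert 1905 t, wtPre 2) := by
        simp [wtStepA, wtPre]
      have hY : wtYearAt 1 = 1905 := by simp [wtYearAt]
      rw [hA, hY, show (1:Int) + 1 = 2 by norm_num, ih 2 (by omega) (d.insert 1905 t)]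
    · by_cases h90 : s = 90
      · subst h90
        have hA : wtStepA (d, wtPre 90) t = (d.insert 1995 t, wtPre 91) := by
          simp [wtStepA, wtPre]
        have hY : wtYearAt 90 = 1995 := by simp [wtYearAt]
        rw [hA, hY, show (90:Int) + 1 = 91 by norm_num, ih 91 (by omega) (d.insert 1995 t)]
      · have hne : wtPre s ≠ 1904 ∧ wtPre s ≠ 1994 := by
          unfold wtPre; split_ifs <;> constructor <;> omega
        have hA : wtStepA (d, wtPre s) t = (d.insert (wtYearAt s) t, wtPre (s + 1)) := by
          simp only [wtStepA, if_pos hne]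
          refine Prod.ext ?_ ?_
          · have : wtPre s = wtYearAt s := by
              unfold wtPre wtYearAt; split_ifs <;> omega
            simp [this]
          · show wtPre s + 1 = wtPre (s + 1)
            unfold wtPre; split_ifs <;> omega
        rw [hA, ih (s + 1) (by omega) (d.insert (wtYearAt s) t)]

-- ===== VERDICT (by name: the statement is the Claim_ definition above) =====
theorem WinningTeam_spec : Claim_equal_WinningTeam := by
  intro list _
  show WinningTeam list = WinningTeam_alt list
  unfold WinningTeam WinningTeam_alt
  have h := wt_fold_eq list 0 (by omega) PySem.Dict.empty
  have h0 : wtPre 0 = 1903 := by simp [wtPre]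
  rw [h0] at h
  rw [h]
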